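-- pv_equiv track=rewrite | github.com/RoyS02/SAT-project | CODE/simplify_with_sets.py | delete_tautologies
-- ===== SOURCE A (Python) =====
-- from typing import Set, List
--
-- def delete_tautologies(clause: Set[int]) -> int:
--     taut_count = 0
--     for literal in clause:
--         opposite_literal = literal * -1
--         if opposite_literal in clause:
--             taut_count += 1
--             return taut_count
--     return taut_count
-- ===== SOURCE B (Python) =====
-- def delete_tautologies(clause):
--     lits = sorted(clause)
--     i, j = 0, len(lits) - 1
--     while i <= j:
--         s = lits[i] + lits[j]
--         if s == 0:
--             return 1
--         if s < 0:
--             i += 1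
--         else:
--             j -= 1
--     return 0
-- ===== Notes on version B (the rewrite author's own statement) =====
-- stated objective: alternative
-- what changed: Replaced the per-element hash-membership loop by sorting the literals and running a two-pointer scan from both ends looking for a pair summing to zero.
import Mathlib
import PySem

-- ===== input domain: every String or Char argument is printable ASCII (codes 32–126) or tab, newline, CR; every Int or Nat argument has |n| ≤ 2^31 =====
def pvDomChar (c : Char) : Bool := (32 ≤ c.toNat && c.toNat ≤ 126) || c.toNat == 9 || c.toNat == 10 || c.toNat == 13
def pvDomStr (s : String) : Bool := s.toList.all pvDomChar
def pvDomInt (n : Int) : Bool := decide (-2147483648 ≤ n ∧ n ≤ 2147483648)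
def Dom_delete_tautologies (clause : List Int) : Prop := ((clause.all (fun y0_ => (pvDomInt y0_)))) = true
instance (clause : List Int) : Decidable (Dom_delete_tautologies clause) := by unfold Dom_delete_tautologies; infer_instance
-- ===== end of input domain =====

-- B finds a complementary pair by sorting the literals and running a two-pointer scan for a
-- zero-sum pair, instead of A's per-element membership loop (alternative algorithm; not faster).


-- ===== PORT A =====
-- A: loop over the clause with an early return on the first complementary pair.
-- (The Python parameter is a set; its List Int here holds the distinct elements. The 0/1
-- result does not depend on iteration order.)
def dtGo (clause : List Int) : List Int → Int → Int
  | [], taut_count => taut_count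
  | literal :: rest, taut_count =>
      if clause.contains (literal * -1) then taut_count + 1
      else dtGo clause rest taut_count

def delete_tautologies (clause : List Int) : Int := dtGo clause clause 0

-- ===== PORT B =====
-- B: sort the literals, then two pointers i (front) and j (back) hunting a pair with sum 0.
-- (lits[i]/lits[j] are always in range when the loop body runs; ported with pyGetD, exact there.)
def dtLoop (lits : List Int) (i j : Int) : Int :=
  if i ≤ j then
    let s := PySem.List.pyGetD lits i 0 + PySem.List.pyGetD lits j 0
    if s = 0 then 1
    else if s < 0 then dtLoop lits (i + 1) j
    else dtLoop lits i (j - 1)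
  else 0
termination_by (j + 1 - i).toNat
decreasing_by all_goals omega

def delete_tautologies_alt (clause : List Int) : Int :=
  let lits := PySem.List.sorted clause (fun x => x) false
  dtLoop lits 0 ((lits.length : Int) - 1)

-- ===== PRECONDITION & SPEC =====
def Spec_delete_tautologies (clause : List Int) (out : Int) : Prop := out = delete_tautologies_alt clause
instance (clause : List Int) (out : Int) : Decidable (Spec_delete_tautologies clause out) := by unfold Spec_delete_tautologies; infer_instance

-- ===== CLAIM (what is proved, stated in full; the proofs are below) =====
def Claim_equal_delete_tautologies : Prop := ∀ (clause : List Int), Dom_delete_tautologies clause → Spec_delete_tautologies clause (delete_tautologies clause)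

-- ===== LEMMAS AND PROOFS =====

lemma dtGo_eq (clause : List Int) (l : List Int) (acc : Int) :
    dtGo clause l acc = if l.any (fun x => clause.contains (-x)) then acc + 1 else acc := by
  induction l with
  | nil => simp [dtGo]
  | cons a t ih =>
      have hm : a * -1 = -a := by ring
      simp only [dtGo, List.any_cons, hm]
      by_cases h : -a ∈ clause
      · simp [h]
      · simp [h, ih]

-- zero-sum pair within index window [i, j]
def HasPair (lits : List Int) (i j : Int) : Prop :=
  ∃ p q : Fin lits.length, i ≤ (p : Int) ∧ (p : Nat) ≤ (q : Nat) ∧ (q : Int) ≤ j ∧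
    lits.get p + lits.get q = 0

lemma get_mono {lits : List Int} (hs : lits.Pairwise (· ≤ ·)) {p q : Fin lits.length}
    (h : (p : Nat) ≤ q) : lits.get p ≤ lits.get q := by
  rcases Nat.lt_or_ge (p : Nat) q with hlt | hge
  · exact (List.pairwise_iff_get.mp hs) p q hlt
  · have : p = q := Fin.ext (le_antisymm h hge)
    simp [this]

-- Two-pointer correctness on a sorted list: dtLoop returns 1 when some pair of positions
-- p ≤ q inside [i, j] has zero sum, else 0.  (Fuel-indexed strong induction.)
lemma dtLoop_spec (lits : List Int) (hs : lits.Pairwise (· ≤ ·)) :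
    ∀ (n : Nat) (i j : Int), (j + 1 - i).toNat ≤ n → 0 ≤ i → j < lits.length →
      (HasPair lits i j → dtLoop lits i j = 1) ∧ (¬ HasPair lits i j → dtLoop lits i j = 0) := by
  intro n
  induction n with
  | zero =>
      intro i j hn hi hj
      have hij : ¬ i ≤ j := by omega
      have hnp : ¬ HasPair lits i j := by
        rintro ⟨p, q, h1, h2, h3, -⟩; omega
      rw [dtLoop]
      simp [hij, hnp]
  | succ n ih =>
      intro i j hn hi hj
      by_cases hij : i ≤ j
      · have hjn : 0 ≤ j := le_trans hi hij
        have hip : i.toNat < lits.length := by omega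
        have hjp : j.toNat < lits.length := by omega
        have hgi : PySem.List.pyGetD lits i 0 = lits.get ⟨i.toNat, hip⟩ := by
          rw [PySem.List.pyGetD_eq_getElem lits 0 hi (by omega)]
          simp
        have hgj : PySem.List.pyGetD lits j 0 = lits.get ⟨j.toNat, hjp⟩ := by
          rw [PySem.List.pyGetD_eq_getElem lits 0 hjn (by omega)]
          simp
        rw [dtLoop]
        simp only [hij, if_true, hgi, hgj]
        set a := lits.get ⟨i.toNat, hip⟩ with ha
        set b := lits.get ⟨j.toNat, hjp⟩ with hb
        by_cases h0 : a + b = 0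
        · have hp : HasPair lits i j :=
            ⟨⟨i.toNat, hip⟩, ⟨j.toNat, hjp⟩, by simp only [Fin.val_mk]; omega,
              by simp only [Fin.val_mk]; omega, by simp only [Fin.val_mk]; omega, h0⟩
          constructor
          · intro _; simp [h0]
          · intro hnp; exact absurd hp hnp
        · by_cases hneg : a + b < 0
          · -- no zero pair can use position i: the partner is ≤ b so the sum is ≤ a + b < 0
            have hstep := ih (i + 1) j (by omega) (by omega) hj
            have hiff : HasPair lits i j ↔ HasPair lits (i + 1) j := by
              constructor
              · rintro ⟨p, q, h1, h2, h3, h4⟩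
                refine ⟨p, q, ?_, h2, h3, h4⟩
                rcases lt_or_eq_of_le h1 with h | h
                · omega
                · exfalso
                  have hpi : p = ⟨i.toNat, hip⟩ := Fin.ext (by simp only [Fin.val_mk]; omega)
                  have hqb : lits.get q ≤ b := get_mono hs (by simp only [Fin.val_mk]; omega)
                  have : lits.get p + lits.get q < 0 := by
                    rw [hpi]; omega
                  omega
              · rintro ⟨p, q, h1, h2, h3, h4⟩
                exact ⟨p, q, by omega, h2, h3, h4⟩
            simp only [if_neg h0, if_pos hneg]
            exact ⟨fun hp => hstep.1 (hiff.mp hp), fun hnp => hstep.2 (fun hp => hnp (hiff.mpr hp))⟩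
          · -- a + b > 0: no zero pair can use position j
            have hstep := ih i (j - 1) (by omega) hi (by omega)
            have hiff : HasPair lits i j ↔ HasPair lits i (j - 1) := by
              constructor
              · rintro ⟨p, q, h1, h2, h3, h4⟩
                refine ⟨p, q, h1, h2, ?_, h4⟩
                rcases lt_or_eq_of_le h3 with h | h
                · omega
                · exfalso
                  have hqj : q = ⟨j.toNat, hjp⟩ := Fin.ext (by simp only [Fin.val_mk]; omega)
                  have hpa : a ≤ lits.get p := get_mono hs (by simp only [Fin.val_mk]; omega)
                  have : 0 < lits.get p + lits.get q := by
                    rw [hqj]; omega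
                  omega
              · rintro ⟨p, q, h1, h2, h3, h4⟩
                exact ⟨p, q, h1, h2, by omega, h4⟩
            simp only [if_neg h0, if_neg hneg]
            exact ⟨fun hp => hstep.1 (hiff.mp hp), fun hnp => hstep.2 (fun hp => hnp (hiff.mpr hp))⟩
      · have hnp : ¬ HasPair lits i j := by
          rintro ⟨p, q, h1, h2, h3, -⟩; omega
        rw [dtLoop]
        simp [hij, hnp]

lemma hasPair_iff (lits : List Int) :
    HasPair lits 0 ((lits.length : Int) - 1) ↔ ∃ x ∈ lits, -x ∈ lits := by
  constructor
  · rintro ⟨p, q, -, -, -, h4⟩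
    exact ⟨lits.get p, List.get_mem _ _, by
      have : -(lits.get p) = lits.get q := by omega
      rw [this]; exact List.get_mem _ _⟩
  · rintro ⟨x, hx, hnx⟩
    obtain ⟨p, hp⟩ := List.get_of_mem hx
    obtain ⟨q, hq⟩ := List.get_of_mem hnx
    rcases Nat.le_total (p : Nat) q with h | h
    · exact ⟨p, q, by omega, h, by omega, by rw [hp, hq]; ring⟩
    · exact ⟨q, p, by omega, h, by omega, by rw [hp, hq]; ring⟩

-- ===== VERDICT (by name: the statement is the Claim_ definition above) =====
theorem delete_tautologies_spec : Claim_equal_delete_tautologies := by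
  intro clause _
  unfold Spec_delete_tautologies delete_tautologies delete_tautologies_alt
  rw [dtGo_eq]
  set lits := PySem.List.sorted clause (fun x => x) false with hl
  have hs : lits.Pairwise (· ≤ ·) := PySem.List.sorted_pairwise clause (fun x => x)
  have hmem : ∀ x, x ∈ lits ↔ x ∈ clause := fun x =>
    PySem.List.mem_sorted clause (fun y => y) false x
  have hspec := dtLoop_spec lits hs ((lits.length : Int) - 1 + 1 - 0).toNat 0
      ((lits.length : Int) - 1) (le_refl _) (le_refl _) (by omega)
  by_cases h : ∃ x ∈ clause, -x ∈ clause
  · have h1 : clause.any (fun x => clause.contains (-x)) = true := by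
      rcases h with ⟨x, hx, hnx⟩
      exact List.any_eq_true.2 ⟨x, hx, by simpa using hnx⟩
    have h2 : HasPair lits 0 ((lits.length : Int) - 1) := by
      rw [hasPair_iff]
      rcases h with ⟨x, hx, hnx⟩
      exact ⟨x, (hmem x).2 hx, (hmem (-x)).2 hnx⟩
    rw [hspec.1 h2, if_pos h1]
    norm_num
  · have h1 : clause.any (fun x => clause.contains (-x)) = false := by
      rw [List.any_eq_false]
      intro x hx
      simp only [List.contains_eq_mem, decide_eq_true_eq]
      exact fun hnx => h ⟨x, hx, hnx⟩
    have h2 : ¬ HasPair lits 0 ((lits.length : Int) - 1) := by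
      rw [hasPair_iff]
      rintro ⟨x, hx, hnx⟩
      exact h ⟨x, (hmem x).1 hx, (hmem (-x)).1 hnx⟩
    rw [hspec.2 h2, if_neg (by simp only [h1]; exact Bool.false_ne_true)]
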